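-- pv_equiv track=rewrite | github.com/pypi-data/pypi-mirror-396 | packages/byteripper/byteripper-1.0.0-py3-none-any.whl/byteripper/core/decompiler.py | _is_junk_line
-- ===== SOURCE A (Python) =====
-- def _is_junk_line(line):
--     junk_patterns = [
--         "= None",
--         "__module__ =",
--         "__qualname__ =",
--         "return None",
--         "None",
--     ]
--     stripped = line.strip()
--     if stripped == "None":
--         return True
--     if stripped == "return None":
--         return True
--     for pattern in junk_patterns:
--         if pattern in stripped and "=" in stripped:
--             parts = stripped.split("=")
--             if len(parts) == 2 and parts[1].strip() == "None":
--                 return True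
--     return False
-- ===== SOURCE B (Python) =====
-- def _is_junk_line(line):
--     stripped = line.strip()
--     if stripped == "None" or stripped == "return None":
--         return True
--     i = stripped.find("=")
--     return i != -1 and "=" not in stripped[i + 1:] and stripped[i + 1:].strip() == "None"
-- ===== Notes on version B (the rewrite author's own statement) =====
-- stated objective: simpler
-- what changed: Replaced the junk-pattern list, its loop and the per-pattern split inside it by a single find-based test (after the two unchanged fast-path comparisons): junk iff the stripped line contains exactly one equals sign and everything after it strips to the word None; the pattern scan is redundant because any line passing the split test necessarily contains that word.
import Mathlib
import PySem

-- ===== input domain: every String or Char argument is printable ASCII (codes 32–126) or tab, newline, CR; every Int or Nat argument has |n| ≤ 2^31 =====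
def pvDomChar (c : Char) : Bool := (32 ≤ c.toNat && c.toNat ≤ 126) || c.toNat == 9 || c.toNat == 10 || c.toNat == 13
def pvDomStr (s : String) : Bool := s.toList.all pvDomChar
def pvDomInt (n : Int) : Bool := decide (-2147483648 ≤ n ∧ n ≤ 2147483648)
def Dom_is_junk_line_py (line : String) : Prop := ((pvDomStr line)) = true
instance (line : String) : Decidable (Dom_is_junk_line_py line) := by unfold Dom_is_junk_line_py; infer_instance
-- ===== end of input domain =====

set_option maxHeartbeats 1000000


-- B replaces A's junk-pattern list, loop and split("=") by a single find("=")-based test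
-- (exactly one '=' and the text after it strips to "None"); objective: simpler.

-- ===== PORT A =====
-- the for-loop over junk_patterns, with Python's early `return True`
def junkLoopA (stripped : String) : List String → Bool
  | [] => false
  | pattern :: rest =>
    if PySem.Str.isIn pattern stripped && PySem.Str.isIn "=" stripped then
      let parts := (PySem.Str.split? stripped "=").getD []
      if parts.length == 2 && PySem.Str.strip (parts.getD 1 "") == "None" then true
      else junkLoopA stripped rest
    else junkLoopA stripped rest

def is_junk_line_py (line : String) : Bool :=
  let junk_patterns := ["= None", "__module__ =", "__qualname__ =", "return None", "None"]
  let stripped := PySem.Str.strip line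
  if stripped == "None" then true
  else if stripped == "return None" then true
  else junkLoopA stripped junk_patterns

-- ===== PORT B =====
def is_junk_line_py_alt (line : String) : Bool :=
  let stripped := PySem.Str.strip line
  if stripped == "None" || stripped == "return None" then true
  else
    let i := PySem.Str.find stripped "="
    i != -1 &&
      !(PySem.Str.isIn "=" (PySem.Str.slice stripped (some (i + 1)) none)) &&
      PySem.Str.strip (PySem.Str.slice stripped (some (i + 1)) none) == "None"

-- ===== PRECONDITION & SPEC =====
def Spec_is_junk_line_py (line : String) (out : Bool) : Prop := out = is_junk_line_py_alt line
instance (line : String) (out : Bool) : Decidable (Spec_is_junk_line_py line out) := by unfold Spec_is_junk_line_py; infer_instance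

-- ===== CLAIM (what is proved, stated in full; the proofs are below) =====
def Claim_equal_is_junk_line_py : Prop := ∀ (line : String), Dom_is_junk_line_py line → Spec_is_junk_line_py line (is_junk_line_py line)

-- ===== LEMMAS AND PROOFS =====

-- simple one-char split on '=' (specification of PySem.Chars.splitOn for this separator)
def ssp (pre : List Char) : List Char → List (List Char)
  | [] => [pre]
  | c :: t => if c = '=' then pre :: ssp [] t else ssp (pre ++ [c]) t

lemma go_eq_ssp : ∀ (fuel : Nat) (l : List Char), l.length < fuel → ∀ (cur : List Char) (acc : List (List Char)),
    PySem.Chars.splitOn.go ['='] fuel l cur acc = acc.reverse ++ ssp cur.reverse l := by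
  intro fuel
  induction fuel with
  | zero => intro l h; omega
  | succ n ih =>
    intro l h cur acc
    cases l with
    | nil => simp [PySem.Chars.splitOn.go, ssp]
    | cons c rest =>
      by_cases hc : c = '='
      · subst hc
        simp only [PySem.Chars.splitOn.go]
        rw [if_pos (by simp [List.isPrefixOf])]
        simp only [List.length_singleton, List.drop_one, List.tail_cons]
        rw [ih rest (by simpa using h) [] (cur.reverse :: acc)]
        simp [ssp]
      · simp only [PySem.Chars.splitOn.go]
        rw [if_neg (by simp [List.isPrefixOf]; exact fun e => hc e.symm)]
        rw [ih rest (by simpa using h) (c :: cur) acc]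
        simp [ssp, hc]

lemma splitOn_eq_ssp (cs : List Char) : PySem.Chars.splitOn cs ['='] = ssp [] cs := by
  have := go_eq_ssp (cs.length + 1) cs (by omega) [] []
  simpa [PySem.Chars.splitOn] using this

lemma ssp_length (l : List Char) : ∀ pre, (ssp pre l).length = l.count '=' + 1 := by
  induction l with
  | nil => simp [ssp]
  | cons c t ih =>
    intro pre
    by_cases hc : c = '=' <;> simp [ssp, hc, ih]

lemma ssp_no_sep (l : List Char) (h : '=' ∉ l) : ∀ pre, ssp pre l = [pre ++ l] := by
  induction l with
  | nil => simp [ssp]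
  | cons c t ih =>
    intro pre
    have hc : ¬ c = '=' := fun e => h (by simp [e])
    simp [ssp, hc, ih (fun m => h (List.mem_cons_of_mem _ m))]

lemma ssp_split (a : List Char) (b : List Char) (h : '=' ∉ a) : ∀ pre,
    ssp pre (a ++ '=' :: b) = (pre ++ a) :: ssp [] b := by
  induction a with
  | nil => simp [ssp]
  | cons c t ih =>
    intro pre
    have hc : ¬ c = '=' := fun e => h (by simp [e])
    simp [ssp, hc, ih (fun m => h (List.mem_cons_of_mem _ m))]

lemma strip_infix (l : List Char) : PySem.Chars.strip l <:+: l := by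
  unfold PySem.Chars.strip PySem.Chars.rstrip PySem.Chars.lstrip
  have h1 : (List.dropWhile PySem.Chars.isspace (List.dropWhile PySem.Chars.isspace l).reverse).reverse
      <+: List.dropWhile PySem.Chars.isspace l := by
    have := List.dropWhile_suffix (l := (List.dropWhile PySem.Chars.isspace l).reverse) (p := PySem.Chars.isspace)
    exact List.reverse_suffix.mp (by simpa using this)
  exact (h1.isInfix).trans (List.dropWhile_suffix _).isInfix

lemma singleton_infix (c : Char) (l : List Char) : [c] <:+: l ↔ c ∈ l := by
  constructor
  · intro ⟨s, t, h⟩; subst h; simp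
  · intro h
    obtain ⟨j, hj, he⟩ := List.getElem_of_mem h
    exact ⟨l.take j, l.drop (j+1), by rw [← he]; simp⟩

lemma find_decomp (cs : List Char) (h : '=' ∈ cs) :
    cs = cs.take (PySem.Chars.find cs ['=']).toNat ++ '=' :: cs.drop ((PySem.Chars.find cs ['=']).toNat + 1)
    ∧ '=' ∉ cs.take (PySem.Chars.find cs ['=']).toNat := by
  have hnn : 0 ≤ PySem.Chars.find cs ['='] :=
    (PySem.Chars.find_nonneg_iff _ _).mpr ((singleton_infix _ _).mpr h)
  obtain ⟨hpre, hmin⟩ := PySem.Chars.find_spec hnn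
  set i := (PySem.Chars.find cs ['=']).toNat with hi
  have hilen : i < cs.length := by
    by_contra hk
    have : cs.drop i = [] := List.drop_eq_nil_of_le (by omega)
    rw [this] at hpre
    simp at hpre
  have hgetI : cs[i] = '=' := by
    rw [List.drop_eq_getElem_cons hilen] at hpre
    obtain ⟨t, ht⟩ := hpre
    have h' : '=' :: t = cs[i] :: cs.drop (i + 1) := by simpa using ht
    injection h' with h1 _
    exact h1.symm
  constructor
  · conv_lhs => rw [← List.take_append_drop i cs]
    rw [List.drop_eq_getElem_cons hilen, hgetI]
  · intro hmemtake
    obtain ⟨j, hj, hje⟩ := List.getElem_of_mem hmemtake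
    have hjb : j < i ∧ j < cs.length := by simpa using hj
    rw [List.getElem_take] at hje
    exact hmin j hjb.1 ⟨cs.drop (j + 1),
      by rw [List.drop_eq_getElem_cons hjb.2, hje]; rfl⟩

-- Python-B's boolean test, on char lists
def bcondC (cs : List Char) : Bool :=
  PySem.Chars.find cs ['='] != -1 &&
    !(PySem.Chars.isIn ['='] (List.drop ((PySem.Chars.find cs ['=']).toNat + 1) cs)) &&
    decide (PySem.Chars.strip (List.drop ((PySem.Chars.find cs ['=']).toNat + 1) cs) = "None".toList)

-- A's inner split test, on char lists
def acondC (cs : List Char) : Bool :=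
  (ssp [] cs).length == 2 && decide (PySem.Chars.strip ((ssp [] cs).getD 1 []) = "None".toList)

lemma acond_eq_bcond (cs : List Char) : acondC cs = bcondC cs := by
  by_cases hmem : '=' ∈ cs
  · obtain ⟨hdecomp, hnotake⟩ := find_decomp cs hmem
    set i := (PySem.Chars.find cs ['=']).toNat with hi
    set b0 := cs.drop (i + 1) with hb0
    have hssp : ssp [] cs = cs.take i :: ssp [] b0 := by
      conv_lhs => rw [hdecomp]
      rw [ssp_split _ _ hnotake]; simp
    have hfne : (PySem.Chars.find cs ['='] != -1) = true := by
      have : 0 ≤ PySem.Chars.find cs ['='] :=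
        (PySem.Chars.find_nonneg_iff _ _).mpr ((singleton_infix _ _).mpr hmem)
      simp; omega
    by_cases hb : '=' ∈ b0
    · have hlen : (ssp [] cs).length = b0.count '=' + 2 := by rw [hssp]; simp [ssp_length]
      have hcnt : 0 < b0.count '=' := List.count_pos_iff.mpr hb
      have ha : acondC cs = false := by
        unfold acondC
        rw [hlen]
        simp; omega
      have hin : PySem.Chars.isIn ['='] b0 = true :=
        (PySem.Chars.isIn_iff_infix _ _).mpr ((singleton_infix _ _).mpr hb)
      unfold bcondC
      rw [ha, ← hb0, hin]
      simp
    · have hsspb : ssp [] b0 = [b0] := by simpa using ssp_no_sep b0 hb []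
      have hin : PySem.Chars.isIn ['='] b0 = false := by
        rw [PySem.Chars.isIn_eq_false_iff _ _]
        exact fun hinf => hb ((singleton_infix _ _).mp hinf)
      unfold acondC bcondC
      rw [hssp, hsspb, ← hb0, hin, hfne]
      simp
  · have hf : PySem.Chars.find cs ['='] = -1 := by
      rw [PySem.Chars.find_eq_neg_one_iff _ _]
      exact fun hinf => hmem ((singleton_infix _ _).mp hinf)
    have hssp : ssp [] cs = [cs] := by simpa using ssp_no_sep cs hmem []
    unfold acondC bcondC
    rw [hf, hssp]
    simp

lemma acond_mem (cs : List Char) (h : acondC cs = true) :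
    PySem.Chars.isIn ['='] cs = true ∧ PySem.Chars.isIn "None".toList cs = true := by
  unfold acondC at h
  simp only [Bool.and_eq_true, beq_iff_eq, decide_eq_true_eq] at h
  obtain ⟨hlen, hstrip⟩ := h
  have hmem : '=' ∈ cs := by
    by_contra hmem
    rw [show ssp [] cs = [cs] from by simpa using ssp_no_sep cs hmem []] at hlen
    simp at hlen
  refine ⟨(PySem.Chars.isIn_iff_infix _ _).mpr ((singleton_infix _ _).mpr hmem), ?_⟩
  obtain ⟨hdecomp, hnotake⟩ := find_decomp cs hmem
  set i := (PySem.Chars.find cs ['=']).toNat with hi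
  set b0 := cs.drop (i + 1) with hb0
  have hssp : ssp [] cs = cs.take i :: ssp [] b0 := by
    conv_lhs => rw [hdecomp]
    rw [ssp_split _ _ hnotake]; simp
  have hb : '=' ∉ b0 := by
    intro hb
    rw [hssp] at hlen
    have := ssp_length b0 []
    have := List.count_pos_iff.mpr hb
    simp [ssp_length] at hlen
    omega
  have hsspb : ssp [] b0 = [b0] := by simpa using ssp_no_sep b0 hb []
  rw [hssp, hsspb] at hstrip
  simp only [List.getD_cons_succ, List.getD_cons_zero] at hstrip
  have h1 : "None".toList <:+: b0 := by rw [← hstrip]; exact strip_infix b0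
  have h2 : b0 <:+: cs := (List.drop_suffix _ _).isInfix
  exact (PySem.Chars.isIn_iff_infix _ _).mpr (h1.trans h2)

lemma ofList_eq_iff (y : List Char) (t : String) : String.ofList y = t ↔ y = t.toList := by
  constructor
  · intro h; rw [← h, String.toList_ofList]
  · intro h; rw [h, String.ofList_toList]

lemma getD_map_ofList (l : List (List Char)) : ∀ (n : Nat),
    (l.map String.ofList).getD n "" = String.ofList (l.getD n []) := by
  induction l with
  | nil => intro n; cases n <;> rfl
  | cons x t ih => intro n; cases n <;> simp [ih]

lemma strip_ofList_beq (x : List Char) :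
    (PySem.Str.strip (String.ofList x) == "None") = decide (PySem.Chars.strip x = "None".toList) := by
  have h1 : PySem.Str.strip (String.ofList x) = String.ofList (PySem.Chars.strip x) := by
    simp [PySem.Str.strip]
  rw [h1, Bool.beq_eq_decide_eq]
  exact decide_eq_decide.mpr (ofList_eq_iff _ _)

lemma str_test_eq (s : String) :
    (((PySem.Str.split? s "=").getD []).length == 2 &&
      PySem.Str.strip ((((PySem.Str.split? s "=").getD [])).getD 1 "") == "None") = acondC s.toList := by
  have hsplit : PySem.Str.split? s "=" = some ((ssp [] s.toList).map String.ofList) := by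
    simp [PySem.Str.split?, PySem.Chars.split?, splitOn_eq_ssp]
  rw [hsplit]
  unfold acondC
  simp only [Option.getD_some, List.length_map, getD_map_ofList, strip_ofList_beq]

lemma junkLoopA_eq (s : String) (ps : List String) :
    junkLoopA s ps = (ps.any (fun p => PySem.Str.isIn p s) && PySem.Str.isIn "=" s && acondC s.toList) := by
  induction ps with
  | nil => simp [junkLoopA]
  | cons p rest ih =>
    show (if PySem.Str.isIn p s && PySem.Str.isIn "=" s then
      if ((PySem.Str.split? s "=").getD []).length == 2 &&
          PySem.Str.strip ((((PySem.Str.split? s "=").getD [])).getD 1 "") == "None" then true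
      else junkLoopA s rest
      else junkLoopA s rest) = _
    rw [str_test_eq, ih]
    cases hp : PySem.Chars.isIn p.toList s.toList <;> cases he : PySem.Chars.isIn "=".toList s.toList <;>
      cases ha : acondC s.toList <;> simp [hp, he, ha]

lemma loop_eq_bcond (s : String) :
    junkLoopA s ["= None", "__module__ =", "__qualname__ =", "return None", "None"] = bcondC s.toList := by
  rw [junkLoopA_eq, ← acond_eq_bcond]
  cases ha : acondC s.toList
  · simp
  · obtain ⟨h1, h2⟩ := acond_mem _ ha
    simp only [Bool.and_true]
    simp
    exact ⟨Or.inr (Or.inr (Or.inr (Or.inr (by simpa using h2)))), by simpa using h1⟩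

lemma bcond_expand (cs : List Char) :
    (PySem.Chars.find cs ['='] != -1 &&
      !(PySem.Chars.isIn ['='] (PySem.List.slice cs (some (PySem.Chars.find cs ['='] + 1)) none)) &&
      decide (PySem.Chars.strip (PySem.List.slice cs (some (PySem.Chars.find cs ['='] + 1)) none) = "None".toList)) = bcondC cs := by
  by_cases hf : PySem.Chars.find cs ['='] = -1
  · unfold bcondC
    rw [hf]
    simp
  · have hge : 0 ≤ PySem.Chars.find cs ['='] := by
      have := PySem.Chars.neg_one_le_find cs ['=']
      omega
    have hslice : PySem.List.slice cs (some (PySem.Chars.find cs ['='] + 1)) none =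
        List.drop ((PySem.Chars.find cs ['=']).toNat + 1) cs := by
      rw [PySem.List.slice_from _ (by omega)]
      congr 1
      omega
    unfold bcondC
    rw [hslice]

lemma alt_eq (s : String) :
    (PySem.Str.find s "=" != -1 &&
      !(PySem.Str.isIn "=" (PySem.Str.slice s (some (PySem.Str.find s "=" + 1)) none)) &&
      PySem.Str.strip (PySem.Str.slice s (some (PySem.Str.find s "=" + 1)) none) == "None") = bcondC s.toList := by
  have heq : "=".toList = ['='] := by decide
  rw [← bcond_expand s.toList]
  simp only [PySem.Str.find, PySem.Str.isIn, PySem.Str.slice, String.toList_ofList,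
    strip_ofList_beq, heq, PySem.Chars.slice_eq_listSlice]

-- ===== VERDICT (by name: the statement is the Claim_ definition above) =====
theorem is_junk_line_py_spec : Claim_equal_is_junk_line_py := by
  intro line _
  unfold Spec_is_junk_line_py is_junk_line_py is_junk_line_py_alt
  cases h1 : (PySem.Str.strip line == "None") <;>
  cases h2 : (PySem.Str.strip line == "return None") <;>
    simp only [h1, h2, Bool.false_or, Bool.true_or, Bool.or_self, if_true, if_false,
      Bool.false_eq_true, Bool.true_eq_false, ite_true, ite_false] <;>
    first
      | rfl
      | (rw [loop_eq_bcond]; exact (alt_eq _).symm)
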